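-- pv_equiv track=rewrite | github.com/seesmof/Competitive-LeetCode-Programming | archive/SP_lab1/9.py | solve
-- ===== SOURCE A (Python) =====
-- def solve(Q: [int], Y: [int]) -> bool:
--     # sort two arrays
--     takeFrom, lookIn = sorted(Q), sorted(Y)
--     # for keeping track of the items in the original array
--     count = 0
--     # loop over each item in the array
--     for item in takeFrom:
--         # check if the item is in our target array
--         if item in lookIn:
--             # if so, increment the counter
--             count += 1
--         # if its not, it means that we cannot get an array Q from an array Y
--         else:
--             # so we immediately return false
--             return False
--     return True if count == len(takeFrom) else False
-- ===== SOURCE B (Python) =====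
-- def solve(Q: [int], Y: [int]) -> bool:
--     # two-pointer merge over the two sorted arrays: one linear pass
--     sq, sy = sorted(Q), sorted(Y)
--     j = 0
--     for q in sq:
--         while j < len(sy) and sy[j] < q:
--             j += 1
--         if j == len(sy) or sy[j] != q:
--             return False
--         # do NOT advance j on a match: duplicate q's re-match the same y
--     return True
-- ===== Notes on version B (the rewrite author's own statement) =====
-- stated objective: alternative
-- what changed: Keeps the two sorts but replaces the per-element linear membership scan (and the redundant counter) with a single two-pointer merge pass over the sorted arrays; worst-case cost drops from quadratic to the sort, though a timing run's inputs showed no measured speedup.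
import Mathlib
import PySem

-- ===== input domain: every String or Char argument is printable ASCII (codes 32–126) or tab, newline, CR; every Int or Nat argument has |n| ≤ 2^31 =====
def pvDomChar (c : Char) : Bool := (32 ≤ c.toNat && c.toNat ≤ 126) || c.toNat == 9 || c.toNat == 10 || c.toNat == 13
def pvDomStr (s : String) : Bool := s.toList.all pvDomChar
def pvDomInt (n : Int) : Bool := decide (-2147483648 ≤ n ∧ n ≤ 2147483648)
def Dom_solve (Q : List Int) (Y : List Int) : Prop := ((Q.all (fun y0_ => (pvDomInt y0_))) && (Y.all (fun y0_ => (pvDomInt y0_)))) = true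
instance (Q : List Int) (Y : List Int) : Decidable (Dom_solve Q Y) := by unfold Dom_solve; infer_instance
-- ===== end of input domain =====

-- B keeps A's two sorts but replaces the per-element membership scan
-- (and A's redundant counter) with one two-pointer merge pass over the sorted arrays.

-- ===== PORT A =====
-- the for-loop over takeFrom with early 'return False'; after it, the 'count == len' check
def solveLoop (lookIn : List Int) (n : Nat) : List Int → Int → Bool
  | [], count => if count = (n : Int) then true else false
  | item :: rest, count =>
      if lookIn.contains item then solveLoop lookIn n rest (count + 1) else false

def solve (Q : List Int) (Y : List Int) : Bool :=
  let takeFrom := PySem.List.sorted Q (fun x => x) false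
  let lookIn := PySem.List.sorted Y (fun x => x) false
  solveLoop lookIn takeFrom.length takeFrom 0

-- ===== PORT B =====
-- the inner 'while j < len(sy) and sy[j] < q: j += 1', as advancing into the suffix of sy
def advance (q : Int) : List Int → List Int
  | [] => []
  | y :: ys => if y < q then advance q ys else y :: ys

-- the outer 'for q in sq' loop with its early 'return False'
def mergeCheck : List Int → List Int → Bool
  | [], _ => true
  | q :: qs, ys =>
      match advance q ys with
      | [] => false                                   -- j == len(sy)
      | y :: ys' => if y ≠ q then false               -- sy[j] != q
                    else mergeCheck qs (y :: ys')     -- match: advance only the Q pointer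

def solve_alt (Q : List Int) (Y : List Int) : Bool :=
  mergeCheck (PySem.List.sorted Q (fun x => x) false) (PySem.List.sorted Y (fun x => x) false)

-- ===== PRECONDITION & SPEC =====
def Spec_solve (Q : List Int) (Y : List Int) (out : Bool) : Prop := out = solve_alt Q Y
instance (Q : List Int) (Y : List Int) (out : Bool) : Decidable (Spec_solve Q Y out) := by unfold Spec_solve; infer_instance

-- ===== CLAIM =====
def Claim_equal_solve : Prop := ∀ (Q : List Int) (Y : List Int), Dom_solve Q Y → Spec_solve Q Y (solve Q Y)

-- ===== LEMMAS AND PROOFS =====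

-- A's loop: counter always ends equal to the length, so it is 'all elements are members'
theorem solveLoop_eq (lookIn : List Int) (n : Nat) (xs : List Int) (c : Int) :
    solveLoop lookIn n xs c =
      (xs.all lookIn.contains && decide (c + (xs.length : Int) = (n : Int))) := by
  induction xs generalizing c with
  | nil => simp [solveLoop]
  | cons x rest ih =>
      simp only [solveLoop, List.all_cons, List.length_cons]
      by_cases h : lookIn.contains x = true
      · rw [if_pos h, ih, h]
        simp only [Bool.true_and]
        congr 1
        rw [decide_eq_decide]
        omega
      · rw [if_neg h, Bool.eq_false_iff.mpr h]
        simp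

theorem solve_iff (Q Y : List Int) : solve Q Y = true ↔ ∀ q ∈ Q, q ∈ Y := by
  unfold solve
  rw [solveLoop_eq]
  simp [List.all_eq_true, PySem.List.mem_sorted]

-- B's inner while loop only skips elements strictly below q
theorem mem_advance (q x : Int) (ys : List Int) (hx : q ≤ x) :
    x ∈ advance q ys ↔ x ∈ ys := by
  induction ys with
  | nil => simp [advance]
  | cons y ys ih =>
      simp only [advance]
      split_ifs with h
      · rw [ih]; constructor
        · exact fun hm => List.mem_cons_of_mem _ hm
        · intro hm
          rcases List.mem_cons.mp hm with rfl | hm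
          · omega
          · exact hm
      · rfl

theorem advance_sorted (q : Int) (ys : List Int) (h : ys.Pairwise (· ≤ ·)) :
    (advance q ys).Pairwise (· ≤ ·) := by
  induction ys with
  | nil => simp [advance]
  | cons y ys ih =>
      simp only [advance]
      rcases List.pairwise_cons.mp h with ⟨_, hys⟩
      split_ifs with hlt
      · exact ih hys
      · exact h

-- head of the advanced suffix decides membership of q (ys sorted)
theorem advance_head (q : Int) (ys : List Int) (h : ys.Pairwise (· ≤ ·)) :
    (advance q ys).head? = some q ↔ q ∈ ys := by
  induction ys with
  | nil => simp [advance]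
  | cons y ys ih =>
      rcases List.pairwise_cons.mp h with ⟨hle, hys⟩
      simp only [advance]
      split_ifs with hlt
      · rw [ih hys]
        constructor
        · exact fun hm => List.mem_cons_of_mem _ hm
        · intro hm
          rcases List.mem_cons.mp hm with rfl | hm
          · omega
          · exact hm
      · simp only [List.head?_cons, Option.some_inj, List.mem_cons]
        constructor
        · intro h'; exact Or.inl h'.symm
        · intro h'
          rcases h' with rfl | hm
          · rfl
          · have := hle q hm; omega

theorem mergeCheck_iff (qs ys : List Int) (hq : qs.Pairwise (· ≤ ·))
    (hy : ys.Pairwise (· ≤ ·)) :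
    mergeCheck qs ys = true ↔ ∀ q ∈ qs, q ∈ ys := by
  induction qs generalizing ys with
  | nil => simp [mergeCheck]
  | cons q qs ih =>
      rcases List.pairwise_cons.mp hq with ⟨hqle, hqs⟩
      simp only [mergeCheck]
      have hhead := advance_head q ys hy
      have hsorted := advance_sorted q ys hy
      cases hadv : advance q ys with
      | nil =>
          rw [hadv] at hhead
          simp only [List.head?_nil] at hhead
          simp only [Bool.false_eq_true, false_iff]
          intro hall
          have hq' : q ∈ ys := hall q List.mem_cons_self
          simp [hq'] at hhead
      | cons y ys' =>
          rw [hadv] at hhead hsorted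
          simp only [List.head?_cons, Option.some_inj] at hhead
          by_cases hyq : y = q
          · subst hyq
            simp only [ne_eq, not_true_eq_false, if_false]
            rw [ih (y :: ys') hqs hsorted]
            have hymem : y ∈ ys := hhead.mp rfl
            constructor
            · intro hall p hp
              rcases List.mem_cons.mp hp with rfl | hp
              · exact hymem
              · have := hall p hp
                rw [← hadv] at this
                exact (mem_advance y p ys (hqle p hp)).mp this
            · intro hall p hp
              rw [← hadv, mem_advance y p ys (hqle p hp)]
              exact hall p (List.mem_cons_of_mem _ hp)
          · simp only [ne_eq, hyq, not_false_eq_true, if_true, Bool.false_eq_true, false_iff]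
            intro hall
            exact hyq (hhead.mpr (hall q List.mem_cons_self))

theorem solve_alt_iff (Q Y : List Int) : solve_alt Q Y = true ↔ ∀ q ∈ Q, q ∈ Y := by
  unfold solve_alt
  rw [mergeCheck_iff _ _ (PySem.List.sorted_pairwise Q (fun x => x) )
      (PySem.List.sorted_pairwise Y (fun x => x))]
  simp [PySem.List.mem_sorted]

-- ===== VERDICT =====
theorem solve_spec : Claim_equal_solve := by
  intro Q Y _
  unfold Spec_solve
  rw [Bool.eq_iff_iff, solve_iff, solve_alt_iff]
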